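-- pv_equiv track=rewrite | github.com/gabriellaec/desoft-analise-exercicios | backup/user_241/ch47_2020_08_01_21_13_55_968129.py | estritamente_crescente
-- ===== SOURCE A (Python) =====
-- def estritamente_crescente(lista):
--     listax = []
--     listax.append(lista[0])
--     i = 1
--     while i < len(lista):
--         if lista[i] > listax[-1] :
--             listax.append(lista[i])
--         i += 1
--     return listax
-- ===== SOURCE B (Python) =====
-- def estritamente_crescente(lista):
--     res = [lista[0]]
--     for i in range(1, len(lista)):
--         if all(lista[j] < lista[i] for j in range(i)):
--             res.append(lista[i])
--     return res
-- ===== Notes on version B (the rewrite author's own statement) =====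
-- stated objective: alternative
-- what changed: B replaces A's running-tail state (append an element when it is greater than the last kept one) with a stateless per-index rule: keep an element iff it exceeds every earlier element of the input, re-scanning the prefix with all() instead of maintaining the kept list's tail.
import Mathlib
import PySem

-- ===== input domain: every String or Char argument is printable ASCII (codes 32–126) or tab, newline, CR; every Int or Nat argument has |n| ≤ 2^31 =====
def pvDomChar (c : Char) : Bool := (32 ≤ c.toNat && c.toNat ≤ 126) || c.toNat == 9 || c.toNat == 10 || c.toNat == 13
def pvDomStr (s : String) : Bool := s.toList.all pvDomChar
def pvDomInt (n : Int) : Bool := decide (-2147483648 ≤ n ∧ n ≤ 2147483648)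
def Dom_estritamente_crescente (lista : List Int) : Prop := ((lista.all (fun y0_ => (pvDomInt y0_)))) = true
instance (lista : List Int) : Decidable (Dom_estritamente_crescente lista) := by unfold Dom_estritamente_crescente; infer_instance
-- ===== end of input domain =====

-- B drops A's running-tail state and instead keeps lista[i] iff it exceeds every earlier input
-- element (an equivalent stateless rule); same return value, no speed claim (B is O(n^2) vs A's O(n)).

-- ===== PORT A =====
-- loop body of A's while loop: append lista[i] when it is greater than listax[-1]
def estA_body (lista listax : List Int) (i : Int) : List Int :=
  if PySem.List.pyGetD listax (-1) 0 < PySem.List.pyGetD lista i 0 then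
    listax ++ [PySem.List.pyGetD lista i 0]
  else listax

def estritamente_crescente (lista : List Int) : List Int :=
  (PySem.List.pyRange 1 (lista.length : Int) 1).foldl (estA_body lista)
    [PySem.List.pyGetD lista 0 0]

-- ===== PORT B =====
-- all(lista[j] < lista[i] for j in range(i))
def estB_keep (lista : List Int) (i : Int) : Bool :=
  (PySem.List.pyRange 0 i 1).all
    (fun j => PySem.List.pyGetD lista j 0 < PySem.List.pyGetD lista i 0)

def estB_body (lista res : List Int) (i : Int) : List Int :=
  if estB_keep lista i then res ++ [PySem.List.pyGetD lista i 0] else res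

def estritamente_crescente_alt (lista : List Int) : List Int :=
  (PySem.List.pyRange 1 (lista.length : Int) 1).foldl (estB_body lista)
    [PySem.List.pyGetD lista 0 0]

-- ===== PRECONDITION & SPEC =====
-- Both Pythons read the first element before looping and raise IndexError on the empty list; Pre_ excludes exactly that input.
def Pre_estritamente_crescente (lista : List Int) : Prop := lista ≠ []
instance (lista : List Int) : Decidable (Pre_estritamente_crescente lista) := by
  unfold Pre_estritamente_crescente; infer_instance

def pvWitness_estritamente_crescente : List Int := [1, 3, 2, 5]

def Spec_estritamente_crescente (lista : List Int) (out : List Int) : Prop := out = estritamente_crescente_alt lista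
instance (lista : List Int) (out : List Int) : Decidable (Spec_estritamente_crescente lista out) := by unfold Spec_estritamente_crescente; infer_instance

-- ===== CLAIM (what is proved, stated in full; the proofs are below) =====
def Claim_equal_estritamente_crescente : Prop := ∀ (lista : List Int), Dom_estritamente_crescente lista → Pre_estritamente_crescente lista → Spec_estritamente_crescente lista (estritamente_crescente lista)

-- ===== LEMMAS AND PROOFS =====

-- pmax L k = max of L[0..k-1] (for 1 ≤ k), the value of A's listax[-1] after processing indices < k
def pmax (L : List Int) : Nat → Int
  | 0 => PySem.List.pyGetD L 0 0
  | k + 1 => max (pmax L k) (PySem.List.pyGetD L (k : Int) 0)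

lemma allPref (L : List Int) (v : Int) :
    ∀ k : Nat, 1 ≤ k →
      ((PySem.List.pyRange 0 (k : Int) 1).all
        (fun j => PySem.List.pyGetD L j 0 < v)) = decide (pmax L k < v) := by
  intro k hk
  induction k, hk using Nat.le_induction with
  | base =>
      rw [show ((1 : Nat) : Int) = 0 + 1 by norm_num,
        PySem.List.pyRange_one_succ_right (by omega), PySem.List.pyRange_one_eq_nil (by omega)]
      simp [pmax]
  | succ k hk ih =>
      rw [show (((k + 1 : Nat)) : Int) = (k : Int) + 1 by push_cast; ring,
        PySem.List.pyRange_one_succ_right (by omega)]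
      simp only [List.all_append, List.all_cons, List.all_nil, Bool.and_true, ih]
      simp [pmax]

lemma fold_invariant (L : List Int) :
    ∀ k : Nat, 1 ≤ k →
      ((PySem.List.pyRange 1 (k : Int) 1).foldl (estA_body L) [PySem.List.pyGetD L 0 0]
        = (PySem.List.pyRange 1 (k : Int) 1).foldl (estB_body L) [PySem.List.pyGetD L 0 0])
      ∧ PySem.List.pyGetD
          ((PySem.List.pyRange 1 (k : Int) 1).foldl (estA_body L) [PySem.List.pyGetD L 0 0])
          (-1) 0 = pmax L k := by
  intro k hk
  induction k, hk using Nat.le_induction with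
  | base =>
      rw [PySem.List.pyRange_one_eq_nil (by norm_num)]
      constructor
      · rfl
      · have : ([PySem.List.pyGetD L 0 0] : List Int) = [] ++ [PySem.List.pyGetD L 0 0] := rfl
        rw [List.foldl_nil, this, PySem.List.pyGetD_neg_one_append_singleton]
        simp [pmax]
  | succ k hk ih =>
      obtain ⟨hEq, hLast⟩ := ih
      rw [show (((k + 1 : Nat)) : Int) = (k : Int) + 1 by push_cast; ring,
        PySem.List.pyRange_one_succ_right (by omega)]
      rw [List.foldl_append, List.foldl_append, List.foldl_cons, List.foldl_cons,
        List.foldl_nil, List.foldl_nil, ← hEq]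
      have hkeep : estB_keep L (k : Int)
          = decide (pmax L k < PySem.List.pyGetD L (k : Int) 0) := by
        unfold estB_keep; exact allPref L _ k hk
      set A := List.foldl (estA_body L) [PySem.List.pyGetD L 0 0]
        (PySem.List.pyRange 1 (k : Int) 1) with hA
      unfold estA_body estB_body
      rw [hLast, hkeep]
      by_cases hc : pmax L k < PySem.List.pyGetD L (k : Int) 0
      · rw [if_pos hc, if_pos (decide_eq_true hc)]
        have h1 : pmax L (k + 1) = PySem.List.pyGetD L (k : Int) 0 := by
          simp only [pmax]; exact max_eq_right (le_of_lt hc)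
        exact ⟨rfl, by rw [PySem.List.pyGetD_neg_one_append_singleton, h1]⟩
      · rw [if_neg hc, if_neg (by simp only [decide_eq_true_eq]; exact hc)]
        have h2 : pmax L (k + 1) = pmax L k := by
          simp only [pmax]; exact max_eq_left (le_of_not_gt hc)
        exact ⟨rfl, by rw [hLast, h2]⟩

-- ===== VERDICT (by name: the statement is the Claim_ definition above) =====
theorem estritamente_crescente_spec : Claim_equal_estritamente_crescente := by
  intro lista _ hpre
  have hlen : 1 ≤ lista.length := by
    cases lista with
    | nil => exact absurd rfl hpre
    | cons a t => simp
  unfold Spec_estritamente_crescente estritamente_crescente estritamente_crescente_alt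
  exact (fold_invariant lista lista.length hlen).1
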